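-- pv_equiv track=rewrite | github.com/trac3er00/OMG | runtime/install_planner.py | _replace_codex_block
-- ===== SOURCE A (Python) =====
-- def _codex_header_candidates(server_name: str) -> set[str]:
--     return {
--         f"[mcp_servers.{server_name}]",
--         f"[mcp_servers.\"{server_name}\"]",
--     }
--
-- def _replace_codex_block(existing: str, block: list[str], server_name: str) -> str:
--     lines = existing.splitlines(keepends=True)
--     headers = _codex_header_candidates(server_name)
--     start_idx: int | None = None
--     for idx, line in enumerate(lines):
--         if line.strip() in headers:
--             start_idx = idx
--             break
--
--     if start_idx is None:
--         if existing and not existing.endswith("\n"):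
--             existing += "\n"
--         return existing + "".join(block)
--
--     end_idx = len(lines)
--     for idx in range(start_idx + 1, len(lines)):
--         stripped = lines[idx].strip()
--         if stripped.startswith("[") and stripped.endswith("]"):
--             end_idx = idx
--             break
--
--     return "".join(lines[:start_idx] + block + lines[end_idx:])
-- ===== SOURCE B (Python) =====
-- def _replace_codex_block(existing: str, block: list[str], server_name: str) -> str:
--     headers = {
--         f"[mcp_servers.{server_name}]",
--         f"[mcp_servers.\"{server_name}\"]",
--     }
--     out: list[str] = []
--     found = False
--     skipping = False
--     for line in existing.splitlines(keepends=True):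
--         if skipping:
--             s = line.strip()
--             if s.startswith("[") and s.endswith("]"):
--                 skipping = False
--                 out.append(line)
--         elif not found and line.strip() in headers:
--             found = True
--             skipping = True
--             out.extend(block)
--         else:
--             out.append(line)
--     if not found:
--         if existing and not existing.endswith("\n"):
--             return existing + "\n" + "".join(block)
--         return existing + "".join(block)
--     return "".join(out)
-- ===== Notes on version B (the rewrite author's own statement) =====
-- stated objective: alternative
-- what changed: Replaced A's two index-searching passes plus list slicing with a single pass over the lines using a found/skipping state machine that builds the output list directly.
import Mathlib
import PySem

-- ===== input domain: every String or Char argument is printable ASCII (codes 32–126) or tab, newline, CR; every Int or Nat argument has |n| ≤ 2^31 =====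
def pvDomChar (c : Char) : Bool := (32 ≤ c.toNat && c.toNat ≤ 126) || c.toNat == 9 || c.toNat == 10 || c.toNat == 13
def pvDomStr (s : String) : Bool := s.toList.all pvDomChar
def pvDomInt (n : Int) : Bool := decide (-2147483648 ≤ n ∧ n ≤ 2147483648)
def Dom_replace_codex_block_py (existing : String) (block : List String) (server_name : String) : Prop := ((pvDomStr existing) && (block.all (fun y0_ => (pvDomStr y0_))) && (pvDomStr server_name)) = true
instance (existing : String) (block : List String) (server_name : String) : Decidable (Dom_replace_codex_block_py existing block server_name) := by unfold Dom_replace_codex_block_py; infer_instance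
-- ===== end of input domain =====

-- B replaces A's two index-searching passes + slicing by one stateful pass that builds the output list; same cost, different decomposition.

-- Shared primitives (both Pythons call the same builtins / module helper):
-- str.splitlines(keepends=True): exact on Dom, where the only line breaks are \n, \r, \r\n.
def splitKeep : List Char → List Char → List (List Char)
  | acc, [] => if acc.isEmpty then [] else [acc.reverse]
  | acc, '\r' :: '\n' :: rest => (acc.reverse ++ ['\r', '\n']) :: splitKeep [] rest
  | acc, '\r' :: rest => (acc.reverse ++ ['\r']) :: splitKeep [] rest
  | acc, '\n' :: rest => (acc.reverse ++ ['\n']) :: splitKeep [] rest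
  | acc, c :: rest => splitKeep (c :: acc) rest

-- _codex_header_candidates: the two-element set of header strings
def codexHeaders (server_name : String) : PySem.Set (List Char) :=
  PySem.Set.ofList [
    "[mcp_servers.".toList ++ server_name.toList ++ "]".toList,
    "[mcp_servers.\"".toList ++ server_name.toList ++ "\"]".toList]

-- stripped.startswith("[") and stripped.endswith("]")
def isCloser (line : List Char) : Bool :=
  PySem.Chars.startswith (PySem.Chars.strip line) ['['] &&
  PySem.Chars.endswith (PySem.Chars.strip line) [']']

-- ===== PORT A =====
-- first loop of A: index of the first line whose strip is in headers (break on first hit)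
def findHeaderIdx (hs : PySem.Set (List Char)) : List (List Char) → Option Nat
  | [] => none
  | l :: rest =>
      if PySem.Set.contains hs (PySem.Chars.strip l) then some 0
      else (findHeaderIdx hs rest).map (· + 1)

-- second loop of A over range(start+1, len): offset of the first closer line, length if none
def findCloserDelta : List (List Char) → Nat
  | [] => 0
  | l :: rest => if isCloser l then 0 else findCloserDelta rest + 1

def replace_codex_block_py (existing : String) (block : List String) (server_name : String) : String :=
  let lines := splitKeep [] existing.toList
  let headers := codexHeaders server_name
  match findHeaderIdx headers lines with
  | none =>
      let ex := if !existing.toList.isEmpty && !PySem.Chars.endswith existing.toList ['\n']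
                then existing.toList ++ ['\n'] else existing.toList
      String.ofList (ex ++ PySem.Chars.join [] (block.map String.toList))
  | some s =>
      let e := s + 1 + findCloserDelta (lines.drop (s + 1))
      String.ofList (PySem.Chars.join []
        (lines.take s ++ block.map String.toList ++ lines.drop e))

-- ===== PORT B =====
-- B's single pass: state (found, skipping), output list accumulated in reverse
def loopB (hs : PySem.Set (List Char)) (blk : List (List Char)) :
    List (List Char) → Bool → Bool → List (List Char) → Bool × List (List Char)
  | [], found, _, out => (found, out.reverse)
  | line :: rest, found, skipping, out =>
      if skipping then
        if isCloser line then loopB hs blk rest found false (line :: out)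
        else loopB hs blk rest found true out
      else if !found && PySem.Set.contains hs (PySem.Chars.strip line) then
        loopB hs blk rest true true (blk.reverse ++ out)
      else loopB hs blk rest found skipping (line :: out)

def replace_codex_block_py_alt (existing : String) (block : List String) (server_name : String) : String :=
  let r := loopB (codexHeaders server_name) (block.map String.toList)
             (splitKeep [] existing.toList) false false []
  if r.1 then String.ofList (PySem.Chars.join [] r.2)
  else if !existing.toList.isEmpty && !PySem.Chars.endswith existing.toList ['\n'] then
    String.ofList (existing.toList ++ '\n' :: PySem.Chars.join [] (block.map String.toList))
  else
    String.ofList (existing.toList ++ PySem.Chars.join [] (block.map String.toList))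

-- ===== PRECONDITION & SPEC =====
def Spec_replace_codex_block_py (existing : String) (block : List String) (server_name : String) (out : String) : Prop := out = replace_codex_block_py_alt existing block server_name
instance (existing : String) (block : List String) (server_name : String) (out : String) : Decidable (Spec_replace_codex_block_py existing block server_name out) := by unfold Spec_replace_codex_block_py; infer_instance

-- ===== CLAIM (what is proved, stated in full; the proofs are below) =====
def Claim_equal_replace_codex_block_py : Prop := ∀ (existing : String) (block : List String) (server_name : String), Dom_replace_codex_block_py existing block server_name → Spec_replace_codex_block_py existing block server_name (replace_codex_block_py existing block server_name)

-- ===== LEMMAS AND PROOFS =====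

-- after the block is closed (found = true, skipping = false): every remaining line is copied
theorem loopB_done (hs : PySem.Set (List Char)) (blk : List (List Char)) :
    ∀ (ls out : List (List Char)),
      loopB hs blk ls true false out = (true, out.reverse ++ ls) := by
  intro ls
  induction ls with
  | nil => intro out; simp [loopB]
  | cons l rest ih => intro out; simp [loopB, ih]

-- while skipping (found = true): lines are dropped up to the first closer
theorem loopB_skip (hs : PySem.Set (List Char)) (blk : List (List Char)) :
    ∀ (ls out : List (List Char)),
      loopB hs blk ls true true out = (true, out.reverse ++ ls.drop (findCloserDelta ls)) := by
  intro ls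
  induction ls with
  | nil => intro out; simp [loopB, findCloserDelta]
  | cons l rest ih =>
      intro out
      by_cases h : isCloser l = true
      · simp [loopB, h, findCloserDelta, loopB_done]
      · simp [loopB, h, findCloserDelta, ih]

-- no header anywhere: every line is copied and found stays false
theorem loopB_nohdr (hs : PySem.Set (List Char)) (blk : List (List Char)) :
    ∀ (ls : List (List Char)), findHeaderIdx hs ls = none →
      ∀ out, loopB hs blk ls false false out = (false, out.reverse ++ ls) := by
  intro ls
  induction ls with
  | nil => intro _ out; simp [loopB]
  | cons l rest ih =>
      intro h out
      by_cases hc : PySem.Chars.strip l ∈ hs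
      · simp [findHeaderIdx, hc] at h
      · simp [findHeaderIdx, hc] at h
        simp [loopB, hc, ih h]

-- header at index s: copy the prefix, drop the header, insert the block, skip to the closer
theorem loopB_hdr (hs : PySem.Set (List Char)) (blk : List (List Char)) :
    ∀ (ls : List (List Char)) (s : Nat), findHeaderIdx hs ls = some s →
      ∀ out, loopB hs blk ls false false out =
        (true, out.reverse ++ ls.take s ++ blk ++
          (ls.drop (s + 1)).drop (findCloserDelta (ls.drop (s + 1)))) := by
  intro ls
  induction ls with
  | nil => intro s h; simp [findHeaderIdx] at h
  | cons l rest ih =>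
      intro s h out
      by_cases hc : PySem.Chars.strip l ∈ hs
      · simp [findHeaderIdx, hc] at h
        subst h
        simp [loopB, hc, loopB_skip]
      · simp [findHeaderIdx, hc] at h
        obtain ⟨s', hs', rfl⟩ := h
        simp [loopB, hc, ih s' hs']

-- ===== VERDICT (by name: the statement is the Claim_ definition above) =====
theorem replace_codex_block_py_spec : Claim_equal_replace_codex_block_py := by
  intro existing block server_name _
  unfold Spec_replace_codex_block_py replace_codex_block_py replace_codex_block_py_alt
  cases hidx : findHeaderIdx (codexHeaders server_name) (splitKeep [] existing.toList) with
  | none =>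
      rw [loopB_nohdr _ _ _ hidx]
      by_cases hfix : (!existing.toList.isEmpty && !PySem.Chars.endswith existing.toList ['\n']) = true
      · simp [hidx, hfix]
      · simp [hidx, hfix]
  | some s =>
      rw [loopB_hdr _ _ _ s hidx]
      simp [hidx, List.drop_drop]
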